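-- pv_equiv track=rewrite | github.com/MoriartyPuth/Cyber-kill-chain-tool | cyberkillchain/app.py | _infer_stage
-- ===== SOURCE A (Python) =====
-- kill_chain_data = [
--     ("Reconnaissance", "Firewall / IDS", ["Port scanning detected", "Suspicious IP activity"], ["Firewall misconfiguration", "Low IDS sensitivity"]),
--     ("Delivery", "Email Gateway", ["Phishing email blocked", "Malicious attachment detected"], ["User clicked malicious email", "Email filter bypassed"]),
--     ("Exploitation", "Endpoint Security", ["Exploit attempt blocked", "Abnormal behavior detected"], ["Zero-day vulnerability", "Outdated patches"]),
--     ("Installation", "Antivirus", ["Malware installation blocked", "Unauthorized file detected"], ["Antivirus signatures outdated", "Privilege misuse"]),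
--     ("Command & Control", "Network Monitor", ["Suspicious outbound traffic detected", "C2 traffic blocked"], ["Encrypted traffic evaded detection", "DNS monitoring disabled"]),
--     ("Actions on Objectives", "SIEM", ["Data exfiltration detected", "Privilege escalation alert"], ["Insufficient log correlation", "Delayed incident response"])
-- ]
--
-- def _infer_stage(log):
--     stage = (log.get("kill_chain_stage") or "").strip()
--     if stage:
--         return stage
--     tool = (log.get("tool") or "").lower()
--     desc = (log.get("description") or "").lower()
--
--     # Tool-based mapping
--     for s, t, _, _ in kill_chain_data:
--         if t and t.lower() in tool:
--             return s
--
--     # Keyword-based mapping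
--     if any(k in desc for k in ["phish", "email", "attachment"]):
--         return "Delivery"
--     if any(k in desc for k in ["exploit", "rce", "vulnerability"]):
--         return "Exploitation"
--     if any(k in desc for k in ["install", "dropper", "payload", "malware"]):
--         return "Installation"
--     if any(k in desc for k in ["c2", "command", "control", "beacon"]):
--         return "Command & Control"
--     if any(k in desc for k in ["exfil", "steal", "dump", "objectives"]):
--         return "Actions on Objectives"
--     if any(k in desc for k in ["scan", "recon", "probe", "enumerat"]):
--         return "Reconnaissance"
--     return "Reconnaissance"
-- ===== SOURCE B (Python) =====
-- kill_chain_data = [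
--     ("Reconnaissance", "Firewall / IDS", ["Port scanning detected", "Suspicious IP activity"], ["Firewall misconfiguration", "Low IDS sensitivity"]),
--     ("Delivery", "Email Gateway", ["Phishing email blocked", "Malicious attachment detected"], ["User clicked malicious email", "Email filter bypassed"]),
--     ("Exploitation", "Endpoint Security", ["Exploit attempt blocked", "Abnormal behavior detected"], ["Zero-day vulnerability", "Outdated patches"]),
--     ("Installation", "Antivirus", ["Malware installation blocked", "Unauthorized file detected"], ["Antivirus signatures outdated", "Privilege misuse"]),
--     ("Command & Control", "Network Monitor", ["Suspicious outbound traffic detected", "C2 traffic blocked"], ["Encrypted traffic evaded detection", "DNS monitoring disabled"]),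
--     ("Actions on Objectives", "SIEM", ["Data exfiltration detected", "Privilege escalation alert"], ["Insufficient log correlation", "Delayed incident response"])
-- ]
--
-- _KEYWORD_STAGES = [
--     ("Delivery", ["phish", "email", "attachment"]),
--     ("Exploitation", ["exploit", "rce", "vulnerability"]),
--     ("Installation", ["install", "dropper", "payload", "malware"]),
--     ("Command & Control", ["c2", "command", "control", "beacon"]),
--     ("Actions on Objectives", ["exfil", "steal", "dump", "objectives"]),
--     ("Reconnaissance", ["scan", "recon", "probe", "enumerat"]),
-- ]
--
-- # One flat, priority-ordered rule table: tool-substring rules first, then keyword rules.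
-- _RULES = [("tool", t.lower(), s) for s, t, _, _ in kill_chain_data if t] + \
--          [("description", k, s) for s, kws in _KEYWORD_STAGES for k in kws]
--
-- def _infer_stage(log):
--     stage = (log.get("kill_chain_stage") or "").strip()
--     if stage:
--         return stage
--     fields = {"tool": (log.get("tool") or "").lower(),
--               "description": (log.get("description") or "").lower()}
--     # Single back-to-front pass: a higher-priority match overwrites a lower one,
--     # so the accumulator ends as the first matching rule's stage.
--     result = "Reconnaissance"
--     for field, pattern, s in reversed(_RULES):
--         if pattern in fields[field]:
--             result = s
--     return result
-- ===== Notes on version B (the rewrite author's own statement) =====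
-- stated objective: alternative
-- what changed: Compiles tool rules and the six keyword blocks into one flat priority-ordered (field, pattern, stage) rule table and replaces all early-return branching by a single reversed overwrite-accumulator pass over that table.
import Mathlib
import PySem

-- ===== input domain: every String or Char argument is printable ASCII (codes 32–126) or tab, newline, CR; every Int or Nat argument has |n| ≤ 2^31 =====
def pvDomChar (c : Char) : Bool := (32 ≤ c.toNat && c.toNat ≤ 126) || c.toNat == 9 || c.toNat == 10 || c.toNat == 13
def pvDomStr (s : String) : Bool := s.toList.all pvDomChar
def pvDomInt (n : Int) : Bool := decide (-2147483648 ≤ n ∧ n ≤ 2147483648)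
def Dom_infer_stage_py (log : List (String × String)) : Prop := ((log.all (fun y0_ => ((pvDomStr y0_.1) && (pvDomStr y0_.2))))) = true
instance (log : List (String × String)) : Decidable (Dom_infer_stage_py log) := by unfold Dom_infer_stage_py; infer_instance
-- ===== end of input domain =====

-- B compiles the tool rules and the six keyword blocks into one flat priority-ordered
-- (field, pattern, stage) rule table and replaces all early-return branching by a single
-- reversed overwrite-accumulator pass over it; return value only, no side effects.

-- ===== PORT A =====
def kill_chain_data : List (String × String × List String × List String) :=
  [ ("Reconnaissance", "Firewall / IDS", ["Port scanning detected", "Suspicious IP activity"], ["Firewall misconfiguration", "Low IDS sensitivity"]),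
    ("Delivery", "Email Gateway", ["Phishing email blocked", "Malicious attachment detected"], ["User clicked malicious email", "Email filter bypassed"]),
    ("Exploitation", "Endpoint Security", ["Exploit attempt blocked", "Abnormal behavior detected"], ["Zero-day vulnerability", "Outdated patches"]),
    ("Installation", "Antivirus", ["Malware installation blocked", "Unauthorized file detected"], ["Antivirus signatures outdated", "Privilege misuse"]),
    ("Command & Control", "Network Monitor", ["Suspicious outbound traffic detected", "C2 traffic blocked"], ["Encrypted traffic evaded detection", "DNS monitoring disabled"]),
    ("Actions on Objectives", "SIEM", ["Data exfiltration detected", "Privilege escalation alert"], ["Insufficient log correlation", "Delayed incident response"]) ]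

-- A's explicit 'for s, t, _, _ in kill_chain_data: if t and t.lower() in tool: return s' loop
def pyToolLoop : List (String × String × List String × List String) → String → Option String
  | [], _ => none
  | (s, t, _, _) :: rest, tool =>
      if (!(t == "")) && PySem.Str.isIn (PySem.Str.lower t) tool then some s
      else pyToolLoop rest tool

def infer_stage_py (log : List (String × String)) : String :=
  let d := PySem.Dict.mk log
  let stage := PySem.Str.strip ((d.get? "kill_chain_stage").getD "")
  if stage ≠ "" then stage
  else
    let tool := PySem.Str.lower ((d.get? "tool").getD "")
    let desc := PySem.Str.lower ((d.get? "description").getD "")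
    match pyToolLoop kill_chain_data tool with
    | some s => s
    | none =>
      if (["phish", "email", "attachment"].any (fun k => PySem.Str.isIn k desc)) then "Delivery"
      else if (["exploit", "rce", "vulnerability"].any (fun k => PySem.Str.isIn k desc)) then "Exploitation"
      else if (["install", "dropper", "payload", "malware"].any (fun k => PySem.Str.isIn k desc)) then "Installation"
      else if (["c2", "command", "control", "beacon"].any (fun k => PySem.Str.isIn k desc)) then "Command & Control"
      else if (["exfil", "steal", "dump", "objectives"].any (fun k => PySem.Str.isIn k desc)) then "Actions on Objectives"
      else if (["scan", "recon", "probe", "enumerat"].any (fun k => PySem.Str.isIn k desc)) then "Reconnaissance"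
      else "Reconnaissance"

-- ===== PORT B =====
def keyword_stages : List (String × List String) :=
  [ ("Delivery", ["phish", "email", "attachment"]),
    ("Exploitation", ["exploit", "rce", "vulnerability"]),
    ("Installation", ["install", "dropper", "payload", "malware"]),
    ("Command & Control", ["c2", "command", "control", "beacon"]),
    ("Actions on Objectives", ["exfil", "steal", "dump", "objectives"]),
    ("Reconnaissance", ["scan", "recon", "probe", "enumerat"]) ]

-- _RULES: tool-substring rules first, then flattened keyword rules (Source B's two comprehensions)
def rules : List (String × String × String) :=
  (kill_chain_data.filterMap (fun e =>
      if e.2.1 ≠ "" then some ("tool", PySem.Str.lower e.2.1, e.1) else none))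
  ++ (keyword_stages.flatMap (fun e => e.2.map (fun k => ("description", k, e.1))))

def infer_stage_py_alt (log : List (String × String)) : String :=
  let d := PySem.Dict.mk log
  let stage := PySem.Str.strip ((d.get? "kill_chain_stage").getD "")
  if stage ≠ "" then stage
  else
    let fields : PySem.Dict String String :=
      PySem.Dict.mk [("tool", PySem.Str.lower ((d.get? "tool").getD "")),
                     ("description", PySem.Str.lower ((d.get? "description").getD ""))]
    -- for field, pattern, s in reversed(_RULES): if pattern in fields[field]: result = s
    -- (fields[field]: a KeyError is unreachable, every rule's field is a key of fields)
    rules.reverse.foldl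
      (fun acc r => if PySem.Str.isIn r.2.1 ((fields.get? r.1).getD "") then r.2.2 else acc)
      "Reconnaissance"

-- ===== PRECONDITION & SPEC =====
def Spec_infer_stage_py (log : List (String × String)) (out : String) : Prop := out = infer_stage_py_alt log
instance (log : List (String × String)) (out : String) : Decidable (Spec_infer_stage_py log out) := by unfold Spec_infer_stage_py; infer_instance

-- ===== CLAIM (what is proved, stated in full; the proofs are below) =====
def Claim_equal_infer_stage_py : Prop := ∀ (log : List (String × String)), Dom_infer_stage_py log → Spec_infer_stage_py log (infer_stage_py log)

-- ===== LEMMAS AND PROOFS =====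
lemma core (tool desc : String) :
    (match pyToolLoop kill_chain_data tool with
     | some s => s
     | none =>
       if (["phish", "email", "attachment"].any (fun k => PySem.Str.isIn k desc)) then "Delivery"
       else if (["exploit", "rce", "vulnerability"].any (fun k => PySem.Str.isIn k desc)) then "Exploitation"
       else if (["install", "dropper", "payload", "malware"].any (fun k => PySem.Str.isIn k desc)) then "Installation"
       else if (["c2", "command", "control", "beacon"].any (fun k => PySem.Str.isIn k desc)) then "Command & Control"
       else if (["exfil", "steal", "dump", "objectives"].any (fun k => PySem.Str.isIn k desc)) then "Actions on Objectives"
       else if (["scan", "recon", "probe", "enumerat"].any (fun k => PySem.Str.isIn k desc)) then "Reconnaissance"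
       else "Reconnaissance") =
    rules.reverse.foldl
      (fun acc r =>
        if PySem.Str.isIn r.2.1 (((PySem.Dict.mk [("tool", tool), ("description", desc)]).get? r.1).getD "") then r.2.2 else acc)
      "Reconnaissance" := by
  rw [List.foldl_reverse]
  have hl1 : PySem.Str.lower "Firewall / IDS" = "firewall / ids" := by decide
  have hl2 : PySem.Str.lower "Email Gateway" = "email gateway" := by decide
  have hl3 : PySem.Str.lower "Endpoint Security" = "endpoint security" := by decide
  have hl4 : PySem.Str.lower "Antivirus" = "antivirus" := by decide
  have hl5 : PySem.Str.lower "Network Monitor" = "network monitor" := by decide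
  have hl6 : PySem.Str.lower "SIEM" = "siem" := by decide
  simp only [rules, kill_chain_data, keyword_stages, List.filterMap, List.flatMap,
    List.map, List.foldr_cons,
    pyToolLoop, hl1, hl2, hl3, hl4, hl5, hl6,
    List.any_cons, List.any_nil, Bool.or_false]
  simp only [PySem.Dict.get?_mk_cons]
  norm_num
  by_cases h1 : PySem.Chars.isIn ['f', 'i', 'r', 'e', 'w', 'a', 'l', 'l', ' ', '/', ' ', 'i', 'd', 's'] tool.toList = true
  · simp [h1]
  simp only [Bool.not_eq_true] at h1
  simp [h1]
  by_cases h2 : PySem.Chars.isIn ['e', 'm', 'a', 'i', 'l', ' ', 'g', 'a', 't', 'e', 'w', 'a', 'y'] tool.toList = true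
  · simp [h2]
  simp only [Bool.not_eq_true] at h2
  simp [h2]
  by_cases h3 : PySem.Chars.isIn ['e', 'n', 'd', 'p', 'o', 'i', 'n', 't', ' ', 's', 'e', 'c', 'u', 'r', 'i', 't', 'y'] tool.toList = true
  · simp [h3]
  simp only [Bool.not_eq_true] at h3
  simp [h3]
  by_cases h4 : PySem.Chars.isIn ['a', 'n', 't', 'i', 'v', 'i', 'r', 'u', 's'] tool.toList = true
  · simp [h4]
  simp only [Bool.not_eq_true] at h4
  simp [h4]
  by_cases h5 : PySem.Chars.isIn ['n', 'e', 't', 'w', 'o', 'r', 'k', ' ', 'm', 'o', 'n', 'i', 't', 'o', 'r'] tool.toList = true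
  · simp [h5]
  simp only [Bool.not_eq_true] at h5
  simp [h5]
  by_cases h6 : PySem.Chars.isIn ['s', 'i', 'e', 'm'] tool.toList = true
  · simp [h6]
  simp only [Bool.not_eq_true] at h6
  simp [h6]
  by_cases h7 : PySem.Chars.isIn ['p', 'h', 'i', 's', 'h'] desc.toList = true
  · simp [h7]
  simp only [Bool.not_eq_true] at h7
  simp [h7]
  by_cases h8 : PySem.Chars.isIn ['e', 'm', 'a', 'i', 'l'] desc.toList = true
  · simp [h8]
  simp only [Bool.not_eq_true] at h8
  simp [h8]
  by_cases h9 : PySem.Chars.isIn ['a', 't', 't', 'a', 'c', 'h', 'm', 'e', 'n', 't'] desc.toList = true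
  · simp [h9]
  simp only [Bool.not_eq_true] at h9
  simp [h9]
  by_cases h10 : PySem.Chars.isIn ['e', 'x', 'p', 'l', 'o', 'i', 't'] desc.toList = true
  · simp [h10]
  simp only [Bool.not_eq_true] at h10
  simp [h10]
  by_cases h11 : PySem.Chars.isIn ['r', 'c', 'e'] desc.toList = true
  · simp [h11]
  simp only [Bool.not_eq_true] at h11
  simp [h11]
  by_cases h12 : PySem.Chars.isIn ['v', 'u', 'l', 'n', 'e', 'r', 'a', 'b', 'i', 'l', 'i', 't', 'y'] desc.toList = true
  · simp [h12]
  simp only [Bool.not_eq_true] at h12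
  simp [h12]
  by_cases h13 : PySem.Chars.isIn ['i', 'n', 's', 't', 'a', 'l', 'l'] desc.toList = true
  · simp [h13]
  simp only [Bool.not_eq_true] at h13
  simp [h13]
  by_cases h14 : PySem.Chars.isIn ['d', 'r', 'o', 'p', 'p', 'e', 'r'] desc.toList = true
  · simp [h14]
  simp only [Bool.not_eq_true] at h14
  simp [h14]
  by_cases h15 : PySem.Chars.isIn ['p', 'a', 'y', 'l', 'o', 'a', 'd'] desc.toList = true
  · simp [h15]
  simp only [Bool.not_eq_true] at h15
  simp [h15]
  by_cases h16 : PySem.Chars.isIn ['m', 'a', 'l', 'w', 'a', 'r', 'e'] desc.toList = true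
  · simp [h16]
  simp only [Bool.not_eq_true] at h16
  simp [h16]
  by_cases h17 : PySem.Chars.isIn ['c', '2'] desc.toList = true
  · simp [h17]
  simp only [Bool.not_eq_true] at h17
  simp [h17]
  by_cases h18 : PySem.Chars.isIn ['c', 'o', 'm', 'm', 'a', 'n', 'd'] desc.toList = true
  · simp [h18]
  simp only [Bool.not_eq_true] at h18
  simp [h18]
  by_cases h19 : PySem.Chars.isIn ['c', 'o', 'n', 't', 'r', 'o', 'l'] desc.toList = true
  · simp [h19]
  simp only [Bool.not_eq_true] at h19
  simp [h19]
  by_cases h20 : PySem.Chars.isIn ['b', 'e', 'a', 'c', 'o', 'n'] desc.toList = true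
  · simp [h20]
  simp only [Bool.not_eq_true] at h20
  simp [h20]
  by_cases h21 : PySem.Chars.isIn ['e', 'x', 'f', 'i', 'l'] desc.toList = true
  · simp [h21]
  simp only [Bool.not_eq_true] at h21
  simp [h21]
  by_cases h22 : PySem.Chars.isIn ['s', 't', 'e', 'a', 'l'] desc.toList = true
  · simp [h22]
  simp only [Bool.not_eq_true] at h22
  simp [h22]
  by_cases h23 : PySem.Chars.isIn ['d', 'u', 'm', 'p'] desc.toList = true
  · simp [h23]
  simp only [Bool.not_eq_true] at h23
  simp [h23]

-- ===== VERDICT (by name: the statement is the Claim_ definition above) =====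
theorem infer_stage_py_spec : Claim_equal_infer_stage_py := by
  intro log _
  simp only [Spec_infer_stage_py, infer_stage_py, infer_stage_py_alt]
  split
  · rfl
  · exact core _ _
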